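-- pv_equiv track=rewrite | github.com/szapf70/codecomp | codewars/python/active/allocating_hotel_rooms.py | allocate_rooms
-- ===== SOURCE A (Python) =====
-- def allocate_rooms(customers):
--     customers = sorted(customers)
--     rooms = []
--     res = []
--     for cst in customers:
--         if rooms == []:
--             rooms.append(cst[1])
--             res.append(1)
--             continue
--         booked = False
--         for ridx in range(len(rooms)):
--             if rooms[ridx] < cst[0]:
--                 rooms[ridx] = cst[1]
--                 res.append(ridx+1)
--                 booked = True
--                 break
--
--         if not booked:
--             rooms.append(cst[1])
--             res.append(len(rooms))
--
--     ## Write code here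
--     return res
-- ===== SOURCE B (Python) =====
-- from bisect import insort
--
-- def allocate_rooms(customers):
--     res = []
--     busy = []   # (checkout, room) kept sorted ascending
--     free = []   # freed room indices kept sorted ascending
--     count = 0
--     for s, e in sorted(customers):
--         # release every room whose guest checked out before this arrival
--         while busy and busy[0][0] < s:
--             _, r = busy.pop(0)
--             insort(free, r)
--         if free:
--             r = free.pop(0)
--         else:
--             r = count
--             count += 1
--         insort(busy, (e, r))
--         res.append(r + 1)
--     return res
-- ===== Notes on version B (the rewrite author's own statement) =====
-- stated objective: alternative
-- what changed: A rescans the whole room list for every customer to find the lowest free room; B sweeps the sorted customers once, keeping an ascending (checkout, room) busy list and an ascending free-room-index list, releasing checked-out rooms as each arrival comes and taking the head of the free list.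
import Mathlib
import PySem

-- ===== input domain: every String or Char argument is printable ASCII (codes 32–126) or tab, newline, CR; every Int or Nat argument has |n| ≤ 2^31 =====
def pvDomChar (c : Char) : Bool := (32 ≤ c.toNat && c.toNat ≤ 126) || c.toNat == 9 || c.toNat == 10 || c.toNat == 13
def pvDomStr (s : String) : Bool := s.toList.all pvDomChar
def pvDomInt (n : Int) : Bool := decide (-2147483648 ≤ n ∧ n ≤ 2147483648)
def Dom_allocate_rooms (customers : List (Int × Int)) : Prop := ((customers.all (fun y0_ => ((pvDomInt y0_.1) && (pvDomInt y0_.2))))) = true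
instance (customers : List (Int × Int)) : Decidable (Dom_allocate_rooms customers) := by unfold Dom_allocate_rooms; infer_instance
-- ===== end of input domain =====

-- B replaces A's per-customer linear scan over all rooms by an event-driven sweep with a
-- sorted (checkout, room) busy list and a sorted free-room-index list (objective: alternative).

-- ===== PORT A =====
-- inner 'for ridx in range(len(rooms)): if rooms[ridx] < s: rooms[ridx] = e; break'
def arBook (s e : Int) (ridx : Nat) : List Int → Option (List Int × Nat)
  | [] => none
  | r :: rs =>
    if r < s then some (e :: rs, ridx)
    else (arBook s e (ridx + 1) rs).map (fun p => (r :: p.1, p.2))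

def arStep (st : List Int × List Int) (cst : Int × Int) : List Int × List Int :=
  if st.1 = [] then ([cst.2], st.2 ++ [1])
  else
    match arBook cst.1 cst.2 0 st.1 with
    | some p => (p.1, st.2 ++ [(p.2 : Int) + 1])
    | none => (st.1 ++ [cst.2], st.2 ++ [((st.1.length : Int) + 1)])

def allocate_rooms (customers : List (Int × Int)) : List Int :=
  ((PySem.List.sorted2 customers (fun c => c.1) (fun c => c.2)).foldl arStep ([], [])).2

-- ===== PORT B =====
-- bisect.insort on a list of ints (insort_right)
def insortFree (x : Int) : List Int → List Int
  | [] => [x]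
  | y :: ys => if x < y then x :: y :: ys else y :: insortFree x ys

-- Python's lexicographic '<' on int pairs
def pvLt (a b : Int × Int) : Bool := a.1 < b.1 || (!(b.1 < a.1) && a.2 < b.2)

-- bisect.insort on a list of (checkout, room) pairs
def insortBusy (x : Int × Int) : List (Int × Int) → List (Int × Int)
  | [] => [x]
  | y :: ys => if pvLt x y then x :: y :: ys else y :: insortBusy x ys

-- 'while busy and busy[0][0] < s: pop busy[0], insort its room into free'
def popFree (s : Int) : List (Int × Int) → List Int → List (Int × Int) × List Int
  | [], free => ([], free)
  | (c, r) :: bs, free =>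
    if c < s then popFree s bs (insortFree r free) else ((c, r) :: bs, free)

def altStep (st : List (Int × Int) × List Int × Int × List Int) (cst : Int × Int) :
    List (Int × Int) × List Int × Int × List Int :=
  let pq := popFree cst.1 st.1 st.2.1
  match pq.2 with
  | r :: rest => (insortBusy (cst.2, r) pq.1, rest, st.2.2.1, st.2.2.2 ++ [r + 1])
  | [] => (insortBusy (cst.2, st.2.2.1) pq.1, [], st.2.2.1 + 1, st.2.2.2 ++ [st.2.2.1 + 1])

def allocate_rooms_alt (customers : List (Int × Int)) : List Int :=
  ((PySem.List.sorted2 customers (fun c => c.1) (fun c => c.2)).foldl altStep ([], [], 0, [])).2.2.2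

-- ===== PRECONDITION & SPEC =====
def Spec_allocate_rooms (customers : List (Int × Int)) (out : List Int) : Prop := out = allocate_rooms_alt customers
instance (customers : List (Int × Int)) (out : List Int) : Decidable (Spec_allocate_rooms customers out) := by unfold Spec_allocate_rooms; infer_instance

-- ===== CLAIM (what is proved, stated in full; the proofs are below) =====
def Claim_equal_allocate_rooms : Prop := ∀ (customers : List (Int × Int)), Dom_allocate_rooms customers → Spec_allocate_rooms customers (allocate_rooms customers)

-- ===== LEMMAS AND PROOFS =====

-- the invariant relating A's state (rooms) to B's state (busy, free, count),
-- m a lower bound on all future arrival times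
def pvInv (m : Int) (rooms : List Int) (busy : List (Int × Int)) (free : List Int) (count : Int) : Prop :=
  count = (rooms.length : Int) ∧
  free.Pairwise (· < ·) ∧
  busy.Pairwise (fun a b => a.1 ≤ b.1) ∧
  (free ++ busy.map (fun p => p.2)).Perm ((List.range rooms.length).map (fun i : Nat => (i : Int))) ∧
  (∀ r ∈ free, rooms.getD r.toNat 0 < m) ∧
  (∀ p ∈ busy, rooms.getD p.2.toNat 0 = p.1)

theorem pvLt_asymm {a b : Int × Int} (h : pvLt a b = true) : pvLt b a = false := by
  simp [pvLt] at *; omega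

theorem pvLt_trans {a b c : Int × Int} (h1 : pvLt a b = true) (h2 : pvLt b c = true) :
    pvLt a c = true := by
  simp [pvLt] at *; omega

theorem insertBy_pairwise_pvLt (x : Int × Int) (l : List (Int × Int))
    (h : l.Pairwise (fun a b => pvLt b a = false)) :
    (PySem.List.insertBy pvLt x l).Pairwise (fun a b => pvLt b a = false) := by
  induction l with
  | nil => simp [PySem.List.insertBy]
  | cons y ys ih =>
    rcases List.pairwise_cons.mp h with ⟨hy, hys⟩
    rw [PySem.List.insertBy]
    split_ifs with hxy
    · refine List.pairwise_cons.mpr ⟨?_, h⟩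
      intro b hb
      rcases List.mem_cons.mp hb with rfl | hb
      · exact pvLt_asymm hxy
      · by_contra hc
        have hbx : pvLt b x = true := by
          cases hpc : pvLt b x
          · exact absurd hpc hc
          · rfl
        exact absurd (pvLt_trans hbx hxy) (by rw [hy b hb]; simp)
    · refine List.pairwise_cons.mpr ⟨?_, ih hys⟩
      intro b hb
      rcases (PySem.List.mem_insertBy pvLt x b ys).mp hb with rfl | hb
      · cases hpc : pvLt b y
        · rfl
        · exact absurd hpc (by simp [hxy])
      · exact hy b hb

theorem foldl_insertBy_pairwise_pvLt (xs acc : List (Int × Int))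
    (h : acc.Pairwise (fun a b => pvLt b a = false)) :
    (xs.foldl (fun acc x => PySem.List.insertBy pvLt x acc) acc).Pairwise
      (fun a b => pvLt b a = false) := by
  induction xs generalizing acc with
  | nil => simpa using h
  | cons x xs ih => exact ih _ (insertBy_pairwise_pvLt x acc h)

theorem sorted2_starts_pairwise (customers : List (Int × Int)) :
    (PySem.List.sorted2 customers (fun c => c.1) (fun c => c.2)).Pairwise
      (fun a b => a.1 ≤ b.1) := by
  have h : (PySem.List.sorted2 customers (fun c => c.1) (fun c => c.2)).Pairwise
      (fun a b => pvLt b a = false) := by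
    exact foldl_insertBy_pairwise_pvLt customers [] (by simp)
  exact h.imp (by intro a b hab; simp [pvLt] at hab; omega)

theorem mem_insortFree (a x : Int) (l : List Int) :
    a ∈ insortFree x l ↔ a = x ∨ a ∈ l := by
  induction l with
  | nil => simp [insortFree]
  | cons y ys ih => simp [insortFree]; split_ifs <;> simp [ih] <;> tauto

theorem insortFree_perm (x : Int) (l : List Int) : (insortFree x l).Perm (x :: l) := by
  induction l with
  | nil => simp [insortFree]
  | cons y ys ih =>
    simp only [insortFree]
    split_ifs
    · exact List.Perm.refl _
    · exact ((ih.cons y).trans (List.Perm.swap x y ys))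

theorem insortFree_pairwise (x : Int) (l : List Int) (hs : l.Pairwise (· < ·)) (hx : x ∉ l) :
    (insortFree x l).Pairwise (· < ·) := by
  induction l with
  | nil => simp [insortFree]
  | cons y ys ih =>
    simp only [insortFree]
    rcases List.pairwise_cons.mp hs with ⟨hy, hys⟩
    split_ifs with h
    · refine List.pairwise_cons.mpr ⟨?_, hs⟩
      intro b hb
      rcases List.mem_cons.mp hb with rfl | hb
      · exact h
      · exact lt_trans h (hy _ hb)
    · refine List.pairwise_cons.mpr ⟨?_, ih hys (by simp at hx; tauto)⟩
      intro b hb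
      rcases (mem_insortFree b x ys).mp hb with rfl | hb
      · simp at hx; omega
      · exact hy _ hb

theorem insortBusy_perm (x : Int × Int) (l : List (Int × Int)) :
    (insortBusy x l).Perm (x :: l) := by
  induction l with
  | nil => simp [insortBusy]
  | cons y ys ih =>
    simp only [insortBusy]
    split_ifs
    · exact List.Perm.refl _
    · exact ((ih.cons y).trans (List.Perm.swap x y ys))

theorem mem_insortBusy (a x : Int × Int) (l : List (Int × Int)) :
    a ∈ insortBusy x l ↔ a = x ∨ a ∈ l := by
  constructor
  · intro h; have := (insortBusy_perm x l).mem_iff.mp h; simpa using this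
  · intro h; exact (insortBusy_perm x l).mem_iff.mpr (by simpa using h)

theorem insortBusy_pairwise (x : Int × Int) (l : List (Int × Int))
    (hs : l.Pairwise (fun a b => a.1 ≤ b.1)) :
    (insortBusy x l).Pairwise (fun a b => a.1 ≤ b.1) := by
  induction l with
  | nil => simp [insortBusy]
  | cons y ys ih =>
    simp only [insortBusy]
    rcases List.pairwise_cons.mp hs with ⟨hy, hys⟩
    split_ifs with h
    · refine List.pairwise_cons.mpr ⟨?_, hs⟩
      intro b hb
      have hxy : x.1 ≤ y.1 := by simp [pvLt] at h; omega
      rcases List.mem_cons.mp hb with rfl | hb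
      · exact hxy
      · exact le_trans hxy (hy _ hb)
    · refine List.pairwise_cons.mpr ⟨?_, ih hys⟩
      intro b hb
      rcases (mem_insortBusy b x ys).mp hb with rfl | hb
      · simp [pvLt] at h; omega
      · exact hy _ hb

-- small getD facts
theorem pvGetD_append_lt (l : List Int) (x : Int) (i : Nat) (h : i < l.length) :
    (l ++ [x]).getD i 0 = l.getD i 0 := by
  simp [List.getD_eq_getElem?_getD, List.getElem?_append_left h]

theorem pvGetD_set_ne (l : List Int) (i j : Nat) (e : Int) (h : i ≠ j) :
    (l.set j e).getD i 0 = l.getD i 0 := by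
  simp [List.getD_eq_getElem?_getD, List.getElem?_set_ne (Ne.symm h)]

theorem pvMem_range_map (n : Nat) (r : Int) :
    r ∈ (List.range n).map (fun i : Nat => (i : Int)) ↔ ∃ j : Nat, j < n ∧ r = (j : Int) := by
  simp [List.mem_map, List.mem_range, eq_comm]

theorem pvNodup_range_map (n : Nat) : ((List.range n).map (fun i : Nat => (i : Int))).Nodup := by
  refine List.Nodup.map ?_ List.nodup_range
  intro a b h
  have h2 : (a : Int) = b := h
  exact_mod_cast h2

-- characterization of A's inner booking scan
theorem arBook_spec (s e : Int) : ∀ (rooms : List Int) (k : Nat),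
    (arBook s e k rooms = none ∧ ∀ r ∈ rooms, ¬ r < s) ∨
    (∃ j : Nat, j < rooms.length ∧ rooms.getD j 0 < s ∧ (∀ i, i < j → ¬ rooms.getD i 0 < s) ∧
      arBook s e k rooms = some (rooms.set j e, k + j)) := by
  intro rooms
  induction rooms with
  | nil => intro k; left; simp [arBook]
  | cons r rs ih =>
    intro k
    by_cases hr : r < s
    · right
      exact ⟨0, by simp, by simpa using hr, by omega, by simp [arBook, hr]⟩
    · rcases ih (k + 1) with ⟨hn, hall⟩ | ⟨j, hj, hjs, hlt, heq⟩
      · left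
        constructor
        · simp [arBook, hr, hn]
        · intro r' hr'
          rcases List.mem_cons.mp hr' with rfl | hr'
          · exact hr
          · exact hall r' hr'
      · right
        refine ⟨j + 1, by simpa using hj, by simpa using hjs, ?_, ?_⟩
        · intro i hi
          cases i with
          | zero => simpa using hr
          | succ i => simpa using hlt i (by omega)
        · simp [arBook, hr, heq]
          omega

-- characterization of B's release loop
theorem popFree_spec (s : Int) : ∀ (busy : List (Int × Int)) (free : List Int),
    busy.Pairwise (fun a b => a.1 ≤ b.1) →
    free.Pairwise (· < ·) →
    (free ++ busy.map (fun p => p.2)).Nodup →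
    ((popFree s busy free).1.Pairwise (fun a b => a.1 ≤ b.1)) ∧
    ((popFree s busy free).2.Pairwise (· < ·)) ∧
    ((popFree s busy free).2 ++ (popFree s busy free).1.map (fun p => p.2)).Perm
      (free ++ busy.map (fun p => p.2)) ∧
    (∀ p ∈ (popFree s busy free).1, p ∈ busy ∧ s ≤ p.1) ∧
    (∀ r : Int, r ∈ (popFree s busy free).2 ↔ (r ∈ free ∨ ∃ c, (c, r) ∈ busy ∧ c < s)) := by
  intro busy
  induction busy with
  | nil =>
    intro free _ hf _
    refine ⟨by simp [popFree], by simpa [popFree] using hf, by simp [popFree], by simp [popFree], ?_⟩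
    intro r; simp [popFree]
  | cons p bs ih =>
    obtain ⟨c, r⟩ := p
    intro free hb hf hnd
    rcases List.pairwise_cons.mp hb with ⟨hc, hbs⟩
    by_cases hcs : c < s
    · have hrf : r ∉ free := by
        intro hin
        have := List.nodup_append.mp hnd
        exact this.2.2 r hin r (by simp) rfl
      have hperm1 : (insortFree r free ++ bs.map (fun p => p.2)).Perm
          (free ++ ((c, r) :: bs).map (fun p => p.2)) := by
        simp only [List.map_cons]
        exact ((insortFree_perm r free).append_right _).trans List.perm_middle.symm
      have hnd' : (insortFree r free ++ bs.map (fun p => p.2)).Nodup :=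
        hperm1.nodup_iff.mpr hnd
      have hf' : (insortFree r free).Pairwise (· < ·) := insortFree_pairwise r free hf hrf
      have hstep : popFree s ((c, r) :: bs) free = popFree s bs (insortFree r free) := by
        simp [popFree, hcs]
      rcases ih (insortFree r free) hbs hf' hnd' with ⟨c1, c2, c3, c4, c5⟩
      rw [hstep]
      refine ⟨c1, c2, c3.trans hperm1, ?_, ?_⟩
      · intro q hq
        rcases c4 q hq with ⟨hq1, hq2⟩
        exact ⟨List.mem_cons_of_mem _ hq1, hq2⟩
      · intro r'
        rw [c5 r']
        constructor
        · rintro (hin | ⟨c', hc', hlt⟩)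
          · rcases (mem_insortFree r' r free).mp hin with rfl | hin
            · exact Or.inr ⟨c, by simp, hcs⟩
            · exact Or.inl hin
          · exact Or.inr ⟨c', List.mem_cons_of_mem _ hc', hlt⟩
        · rintro (hin | ⟨c', hc', hlt⟩)
          · exact Or.inl ((mem_insortFree r' r free).mpr (Or.inr hin))
          · rcases List.mem_cons.mp hc' with heq | hc'
            · have : r' = r := by cases heq; rfl
              exact Or.inl ((mem_insortFree r' r free).mpr (Or.inl this))
            · exact Or.inr ⟨c', hc', hlt⟩
    · have hstep : popFree s ((c, r) :: bs) free = ((c, r) :: bs, free) := by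
        simp [popFree, hcs]
      rw [hstep]
      refine ⟨hb, hf, List.Perm.refl _, ?_, ?_⟩
      · intro q hq
        refine ⟨hq, ?_⟩
        rcases List.mem_cons.mp hq with rfl | hq
        · omega
        · have := hc q hq; omega
      · intro r'
        constructor
        · intro h; exact Or.inl h
        · rintro (h | ⟨c', hc', hlt⟩)
          · exact h
          · rcases List.mem_cons.mp hc' with heq | hc'
            · exfalso; cases heq; omega
            · exfalso; have := hc _ hc'; simp at this; omega

-- one step of the simulation
theorem step_sim (s e m : Int) (rooms res : List Int) (busy : List (Int × Int))
    (free : List Int) (count : Int) (hm : m ≤ s)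
    (hinv : pvInv m rooms busy free count) :
    (arStep (rooms, res) (s, e)).2 = (altStep (busy, free, count, res) (s, e)).2.2.2 ∧
    pvInv s (arStep (rooms, res) (s, e)).1 (altStep (busy, free, count, res) (s, e)).1
      (altStep (busy, free, count, res) (s, e)).2.1
      (altStep (busy, free, count, res) (s, e)).2.2.1 := by
  obtain ⟨hcount, hfree, hbusy, hperm, hfm, hbm⟩ := hinv
  have hnd : (free ++ busy.map (fun p => p.2)).Nodup :=
    hperm.nodup_iff.mpr (pvNodup_range_map rooms.length)
  obtain ⟨Pb, Pf, Pp, Pmem, Piff⟩ := popFree_spec s busy free hbusy hfree hnd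
  -- membership in free/busy gives a valid room index
  have hidx : ∀ r : Int, r ∈ free ++ busy.map (fun p => p.2) →
      ∃ j : Nat, j < rooms.length ∧ r = (j : Int) := by
    intro r hr
    exact (pvMem_range_map rooms.length r).mp (hperm.mem_iff.mp hr)
  -- key: members of the freed list are exactly the indices of rooms checked out before s
  have K : ∀ r : Int, r ∈ (popFree s busy free).2 ↔
      ∃ j : Nat, r = (j : Int) ∧ j < rooms.length ∧ rooms.getD j 0 < s := by
    intro r
    rw [Piff r]
    constructor
    · rintro (hin | ⟨c, hc, hlt⟩)
      · obtain ⟨j, hj, rfl⟩ := hidx _ (List.mem_append_left _ hin)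
        refine ⟨j, rfl, hj, ?_⟩
        have := hfm _ hin
        simp only [Int.toNat_natCast] at this
        omega
      · obtain ⟨j, hj, rfl⟩ := hidx _ (List.mem_append_right _ (by
          exact List.mem_map.mpr ⟨(c, r), hc, rfl⟩))
        refine ⟨j, rfl, hj, ?_⟩
        have := hbm _ hc
        simp only [Int.toNat_natCast] at this
        omega
    · rintro ⟨j, rfl, hj, hlt⟩
      have hjin : ((j : Int)) ∈ free ++ busy.map (fun p => p.2) :=
        hperm.mem_iff.mpr ((pvMem_range_map rooms.length _).mpr ⟨j, hj, rfl⟩)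
      rcases List.mem_append.mp hjin with hin | hin
      · exact Or.inl hin
      · obtain ⟨p, hp, hp2⟩ := List.mem_map.mp hin
        refine Or.inr ⟨p.1, ?_, ?_⟩
        · have : p = (p.1, (j : Int)) := by
            cases p; simp at hp2 ⊢; omega
          rw [← this]; exact hp
        · have := hbm _ hp
          rw [hp2] at this
          simp only [Int.toNat_natCast] at this
          omega
  rcases arBook_spec s e rooms 0 with ⟨hnone, hall⟩ | ⟨j, hj, hjs, hjlt, heq⟩
  · -- no room available: A appends, B opens room number `count`
    have hfnil : (popFree s busy free).2 = [] := by
      cases hF : (popFree s busy free).2 with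
      | nil => rfl
      | cons r0 rest =>
        exfalso
        have : r0 ∈ (popFree s busy free).2 := by rw [hF]; simp
        obtain ⟨j, rfl, hj, hlt⟩ := (K r0).mp this
        have : rooms.getD j 0 ∈ rooms := by
          rw [List.getD_eq_getElem?_getD, List.getElem?_eq_getElem hj]
          simp
        exact hall _ this hlt
    have hA : arStep (rooms, res) (s, e) = (rooms ++ [e], res ++ [((rooms.length : Int) + 1)]) := by
      by_cases hnil : rooms = []
      · subst hnil; simp [arStep]
      · simp [arStep, hnil, hnone]
    have hB : altStep (busy, free, count, res) (s, e) =
        (insortBusy (e, count) (popFree s busy free).1, [], count + 1, res ++ [count + 1]) := by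
      simp [altStep, hfnil]
    rw [hA, hB]
    refine ⟨by simp [hcount], ?_, by simp, ?_, ?_, ?_, ?_⟩
    · simp [hcount]
    · exact insortBusy_pairwise _ _ Pb
    · -- permutation
      have h2 : ((insortBusy (e, count) (popFree s busy free).1).map (fun p => p.2)).Perm
          (((e, count) :: (popFree s busy free).1).map (fun p => p.2)) :=
        (insortBusy_perm _ _).map _
      have h3 : ((popFree s busy free).1.map (fun p => p.2)).Perm
          ((List.range rooms.length).map (fun i : Nat => (i : Int))) := by
        have h := Pp.trans hperm
        rw [hfnil] at h
        simpa using h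
      have h2' : ((insortBusy (e, count) (popFree s busy free).1).map (fun p => p.2)).Perm
          (count :: (popFree s busy free).1.map (fun p => p.2)) := by simpa using h2
      have h4 := h2'.trans (h3.cons count)
      have h5 : ((List.range (rooms.length + 1)).map (fun i : Nat => (i : Int))).Perm
          (count :: (List.range rooms.length).map (fun i : Nat => (i : Int))) := by
        rw [List.range_succ, List.map_append]
        simpa [hcount] using List.perm_append_singleton ((rooms.length : Int))
          ((List.range rooms.length).map (fun i : Nat => (i : Int)))
      simpa using h4.trans h5.symm
    · intro r hr; simp at hr
    · intro p hp
      rcases (mem_insortBusy p (e, count) (popFree s busy free).1).mp hp with rfl | hp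
      · simp [hcount]
      · obtain ⟨hpb, _⟩ := Pmem p hp
        obtain ⟨j, hjlen, hj2⟩ := hidx p.2
          (List.mem_append_right _ (List.mem_map.mpr ⟨p, hpb, rfl⟩))
        rw [hj2]
        simp only [Int.toNat_natCast]
        rw [pvGetD_append_lt _ _ _ hjlen]
        have := hbm p hpb
        rw [hj2] at this
        simpa using this
  · -- A books room j; B pops the head of the freed list, which is j
    have hjf : ((j : Int)) ∈ (popFree s busy free).2 := (K _).mpr ⟨j, rfl, hj, hjs⟩
    cases hF : (popFree s busy free).2 with
    | nil => rw [hF] at hjf; simp at hjf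
    | cons r0 rest =>
      rw [hF] at hjf K Pf Pp Piff
      have hr0 : r0 = (j : Int) := by
        rcases List.mem_cons.mp hjf with h | h
        · omega
        · exfalso
          have hlt0 : r0 < (j : Int) := (List.pairwise_cons.mp Pf).1 _ h
          obtain ⟨j0, hh, hj0, hlt⟩ := (K r0).mp (by simp)
          have : ¬ j0 < j := fun hc => hjlt j0 hc hlt
          omega
      subst hr0
      have hA : arStep (rooms, res) (s, e) = (rooms.set j e, res ++ [(j : Int) + 1]) := by
        have hnil : rooms ≠ [] := by
          intro h; rw [h] at hj; simp at hj
        simp [arStep, hnil, heq]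
      have hB : altStep (busy, free, count, res) (s, e) =
          (insortBusy (e, (j : Int)) (popFree s busy free).1, rest, count, res ++ [(j : Int) + 1]) := by
        simp [altStep, hF]
      rw [hA, hB]
      have hndpop : (((j : Int) :: rest) ++ (popFree s busy free).1.map (fun p => p.2)).Nodup :=
        Pp.nodup_iff.mpr hnd
      refine ⟨by simp, ?_, ?_, ?_, ?_, ?_, ?_⟩
      · simp [hcount]
      · exact (List.pairwise_cons.mp Pf).2
      · exact insortBusy_pairwise _ _ Pb
      · -- permutation
        have h2 : ((insortBusy (e, (j : Int)) (popFree s busy free).1).map (fun p => p.2)).Perm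
            ((j : Int) :: (popFree s busy free).1.map (fun p => p.2)) :=
          (insortBusy_perm _ _).map _
        have : (rest ++ (insortBusy (e, (j : Int)) (popFree s busy free).1).map (fun p => p.2)).Perm
            (((j : Int) :: rest) ++ (popFree s busy free).1.map (fun p => p.2)) := by
          refine ((List.Perm.refl rest).append h2).trans ?_
          exact List.perm_middle
        refine this.trans ?_
        simpa [List.length_set] using Pp.trans hperm
      · intro r hr
        obtain ⟨j1, rfl, hj1, hlt1⟩ := (K r).mp (by simp [hr])
        have hne : j1 ≠ j := by
          have : (j : Int) < (j1 : Int) := (List.pairwise_cons.mp Pf).1 _ hr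
          omega
        simp only [Int.toNat_natCast]
        rw [pvGetD_set_ne _ _ _ _ hne]
        omega
      · intro p hp
        rcases (mem_insortBusy p (e, (j : Int)) (popFree s busy free).1).mp hp with rfl | hp
        · simp [hj]
        · obtain ⟨hpb, _⟩ := Pmem p hp
          obtain ⟨j2, hj2len, hj2⟩ := hidx p.2
            (List.mem_append_right _ (List.mem_map.mpr ⟨p, hpb, rfl⟩))
          have hne : j2 ≠ j := by
            intro hc
            have hdis := List.disjoint_of_nodup_append hndpop
            have h1 : p.2 ∈ ((j : Int) :: rest) := by rw [hj2, hc]; simp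
            have h2 : p.2 ∈ (popFree s busy free).1.map (fun q => q.2) :=
              List.mem_map.mpr ⟨p, hp, rfl⟩
            exact hdis h1 h2
          rw [hj2]
          simp only [Int.toNat_natCast]
          rw [pvGetD_set_ne _ _ _ _ hne]
          have := hbm p hpb
          rw [hj2] at this
          simpa using this

-- the fold simulation
theorem fold_sim : ∀ (cs : List (Int × Int)) (rooms res : List Int)
    (busy : List (Int × Int)) (free : List Int) (count m : Int),
    cs.Pairwise (fun a b => a.1 ≤ b.1) → (∀ c ∈ cs, m ≤ c.1) →
    pvInv m rooms busy free count →
    (cs.foldl arStep (rooms, res)).2 = (cs.foldl altStep (busy, free, count, res)).2.2.2 := by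
  intro cs
  induction cs with
  | nil => intro rooms res busy free count m _ _ _; simp
  | cons c cs ih =>
    intro rooms res busy free count m hp hm hinv
    obtain ⟨s, e⟩ := c
    rcases List.pairwise_cons.mp hp with ⟨hhead, htail⟩
    obtain ⟨hres, hinv'⟩ := step_sim s e m rooms res busy free count (hm (s, e) (by simp)) hinv
    simp only [List.foldl_cons]
    have h2 := ih (arStep (rooms, res) (s, e)).1 (arStep (rooms, res) (s, e)).2
      (altStep (busy, free, count, res) (s, e)).1
      (altStep (busy, free, count, res) (s, e)).2.1
      (altStep (busy, free, count, res) (s, e)).2.2.1 s htail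
      (fun c hc => hhead c hc) hinv'
    have eB : ((altStep (busy, free, count, res) (s, e)).1,
        (altStep (busy, free, count, res) (s, e)).2.1,
        (altStep (busy, free, count, res) (s, e)).2.2.1,
        (arStep (rooms, res) (s, e)).2) = altStep (busy, free, count, res) (s, e) := by
      rw [hres]
    rw [eB] at h2
    exact h2

-- ===== VERDICT (by name: the statement is the Claim_ definition above) =====
theorem allocate_rooms_spec : Claim_equal_allocate_rooms := by
  intro customers _
  unfold Spec_allocate_rooms allocate_rooms allocate_rooms_alt
  have hp := sorted2_starts_pairwise customers
  cases hcs : PySem.List.sorted2 customers (fun c => c.1) (fun c => c.2) with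
  | nil => simp
  | cons c0 tl =>
    rw [hcs] at hp
    refine fold_sim (c0 :: tl) [] [] [] [] 0 c0.1 hp ?_ ?_
    · intro c hc
      rcases List.mem_cons.mp hc with rfl | hc
      · exact le_refl _
      · exact (List.pairwise_cons.mp hp).1 c hc
    · exact ⟨rfl, by simp, by simp, by simp, by simp, by simp⟩
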